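-- pv_equiv track=rewrite | github.com/jabessouguie/consulting-tools | agents/html_slide_generator.py | extract_sections_from_buffer
-- ===== SOURCE A (Python) =====
-- from typing import Any, Dict, Generator, List, Tuple
--
-- def extract_sections_from_buffer(buffer: str) -> List[str]:
--     """Extrait les <section ...>...</section> completes d'un buffer HTML."""
--     sections = []
--     pos = 0
--     while True:
--         start = buffer.find("<section", pos)
--         if start == -1:
--             break
--         depth = 0
--         i = start
--         while i < len(buffer):
--             if buffer[i : i + 8] == "<section":
--                 depth += 1
--                 i += 8
--             elif buffer[i : i + 10] == "</section>":
--                 depth -= 1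
--                 if depth == 0:
--                     sections.append(buffer[start : i + 10])
--                     pos = i + 10
--                     break
--                 i += 10
--             else:
--                 i += 1
--         else:
--             break  # Incomplete section
--     return sections
-- ===== SOURCE B (Python) =====
-- from typing import List
--
--
-- def extract_sections_from_buffer(buffer: str) -> List[str]:
--     """Extrait les <section ...>...</section> completes d'un buffer HTML.
--
--     Two-phase re-implementation: first build the ordered list of tag events
--     (position, +1 for '<section', -1 for '</section>') in one scan, then walk
--     that event list with a depth counter, emitting a slice each time the depth
--     of an open section returns to zero; stops on an unclosed section.
--     """
--     n = len(buffer)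
--     events = []
--     for i in range(n):
--         if buffer.startswith("<section", i):
--             events.append((i, 1))
--         elif buffer.startswith("</section>", i):
--             events.append((i, -1))
--     sections = []
--     k = 0
--     m = len(events)
--     while k < m:
--         while k < m and events[k][1] != 1:
--             k += 1
--         if k == m:
--             break
--         start = events[k][0]
--         depth = 0
--         closed_end = -1
--         while k < m:
--             pos, d = events[k]
--             k += 1
--             depth += d
--             if depth == 0:
--                 closed_end = pos + 10
--                 break
--         if closed_end < 0:
--             break
--         sections.append(buffer[start:closed_end])
--     return sections
-- ===== Notes on version B (the rewrite author's own statement) =====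
-- stated objective: alternative
-- what changed: Replaces A's nested re-find/rescan loops (outer str.find plus an inner character scan that skips 8/10 chars per tag) by a two-phase algorithm: one linear pass builds an ordered event list of all '<section'/'</section>' occurrences, then a second pass walks that event list with a depth counter to emit complete sections.
import Mathlib
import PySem

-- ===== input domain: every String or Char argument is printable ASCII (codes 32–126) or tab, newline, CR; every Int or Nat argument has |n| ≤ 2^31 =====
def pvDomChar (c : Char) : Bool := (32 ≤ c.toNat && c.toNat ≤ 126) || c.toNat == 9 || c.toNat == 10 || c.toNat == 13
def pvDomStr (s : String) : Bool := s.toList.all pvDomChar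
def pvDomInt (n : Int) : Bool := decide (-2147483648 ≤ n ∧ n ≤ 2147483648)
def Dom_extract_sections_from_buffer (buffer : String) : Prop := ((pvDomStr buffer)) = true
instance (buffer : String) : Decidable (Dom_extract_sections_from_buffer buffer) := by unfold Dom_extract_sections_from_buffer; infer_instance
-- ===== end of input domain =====

-- B replaces A's nested find/rescan loops by a two-phase algorithm (one pass builds an
-- ordered tag-event list, a second pass walks it with a depth counter); same return value.
-- In both ports the `fuel` parameters are totality guards only (always sufficient).

-- ===== PORT A =====

-- the two tag literals, as char lists
def oTag : List Char := ['<', 's', 'e', 'c', 't', 'i', 'o', 'n']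
def cTag : List Char := ['<', '/', 's', 'e', 'c', 't', 'i', 'o', 'n', '>']

-- buffer[i : i+len(pat)] == pat  (the Python slice clamps; `take` clamps the same way)
def matchAt (cs pat : List Char) (i : Nat) : Bool := (cs.drop i).take pat.length == pat

-- exact port of buffer.find(pat, pos) for a NONEMPTY pat: first index ≥ pos where the
-- whole pattern matches (a match needs all of pat, so CPython's i ≤ len-len(pat) bound
-- is implied); Python's -1 becomes none.  fuel len+1-pos covers every step.
def pyFindF (cs pat : List Char) : Nat → Nat → Option Nat
  | fuel + 1, pos =>
    if pos < cs.length then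
      if matchAt cs pat pos then some pos else pyFindF cs pat fuel (pos + 1)
    else none
  | 0, _ => none

def pyFind (cs pat : List Char) (pos : Nat) : Option Nat :=
  pyFindF cs pat (cs.length + 1 - pos) pos

-- A's inner while loop: i walks the buffer, depth the open-tag balance; returns the
-- end index i+10 when depth hits 0 on a close, none when i runs off the end.
def innerF (cs : List Char) : Nat → Nat → Int → Option Nat
  | fuel + 1, i, depth =>
    if i < cs.length then
      if matchAt cs oTag i then innerF cs fuel (i + 8) (depth + 1)
      else if matchAt cs cTag i then
        if depth - 1 = 0 then some (i + 10)
        else innerF cs fuel (i + 10) (depth - 1)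
      else innerF cs fuel (i + 1) depth
    else none
  | 0, _, _ => none

def innerA (cs : List Char) (i : Nat) (depth : Int) : Option Nat :=
  innerF cs (cs.length + 1 - i) i depth

-- A's outer while-True loop (each iteration moves pos ≥ 10 forward; fuel len+1 suffices)
def outerF (cs : List Char) : Nat → Nat → List String → List String
  | fuel + 1, pos, acc =>
    match pyFind cs oTag pos with
    | none => acc
    | some start =>
      match innerA cs start 0 with
      | none => acc
      | some e => outerF cs fuel e (acc ++ [String.ofList ((cs.drop start).take (e - start))])
  | 0, _, acc => acc

def extract_sections_from_buffer (buffer : String) : List String :=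
  outerF buffer.toList (buffer.toList.length + 1) 0 []

-- ===== PORT B =====

-- phase 1: the ordered list of tag events (position, +1 open / -1 close), one pass
def evtsF (cs : List Char) : Nat → Nat → List (Nat × Int)
  | fuel + 1, i =>
    if i < cs.length then
      if matchAt cs oTag i then (i, 1) :: evtsF cs fuel (i + 1)
      else if matchAt cs cTag i then (i, -1) :: evtsF cs fuel (i + 1)
      else evtsF cs fuel (i + 1)
    else []
  | 0, _ => []

def evtsB (cs : List Char) (i : Nat) : List (Nat × Int) :=
  evtsF cs (cs.length + 1 - i) i

-- B's inner skip loop: advance past non-open events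
def skipToOpen (evs : List (Nat × Int)) : List (Nat × Int) :=
  match evs with
  | [] => []
  | e :: t => if e.2 ≠ 1 then skipToOpen t else e :: t

-- B's inner depth loop: consume events until depth hits 0; returns (closed_end, rest)
def consumeB (evs : List (Nat × Int)) (depth : Int) : Option (Nat × List (Nat × Int)) :=
  match evs with
  | [] => none
  | e :: t => if depth + e.2 = 0 then some (e.1 + 10, t) else consumeB t (depth + e.2)

-- phase 2: B's outer while loop over the event list (each iteration strictly shortens
-- the remaining event list; fuel |events|+1 suffices)
def scanF (cs : List Char) : Nat → List (Nat × Int) → List String → List String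
  | fuel + 1, evs, acc =>
    match skipToOpen evs with
    | [] => acc
    | e :: t =>
      match consumeB (e :: t) 0 with
      | none => acc
      | some (endp, rest) =>
          scanF cs fuel rest (acc ++ [String.ofList ((cs.drop e.1).take (endp - e.1))])
  | 0, _, acc => acc

def extract_sections_from_buffer_alt (buffer : String) : List String :=
  scanF buffer.toList ((evtsB buffer.toList 0).length + 1) (evtsB buffer.toList 0) []

-- ===== PRECONDITION & SPEC =====
def Spec_extract_sections_from_buffer (buffer : String) (out : List String) : Prop := out = extract_sections_from_buffer_alt buffer
instance (buffer : String) (out : List String) : Decidable (Spec_extract_sections_from_buffer buffer out) := by unfold Spec_extract_sections_from_buffer; infer_instance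

-- ===== CLAIM (what is proved, stated in full; the proofs are below) =====
def Claim_equal_extract_sections_from_buffer : Prop := ∀ (buffer : String), Dom_extract_sections_from_buffer buffer → Spec_extract_sections_from_buffer buffer (extract_sections_from_buffer buffer)

-- ===== LEMMAS AND PROOFS =====

theorem matchAt_true {cs pat : List Char} {i : Nat} (h : matchAt cs pat i = true) :
    (cs.drop i).take pat.length = pat := by
  simpa [matchAt] using h

theorem match_len {cs pat : List Char} {i : Nat} (h : matchAt cs pat i = true)
    (hp : 0 < pat.length) : i + pat.length ≤ cs.length := by
  have := congrArg List.length (matchAt_true h)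
  simp [List.length_take, List.length_drop] at this
  omega

theorem drop_match {cs pat : List Char} {i : Nat} (h : matchAt cs pat i = true) :
    cs.drop i = pat ++ cs.drop (i + pat.length) := by
  conv_lhs => rw [← List.take_append_drop pat.length (cs.drop i)]
  rw [matchAt_true h, List.drop_drop, Nat.add_comm]

theorem noMatch_head {cs : List Char} {j : Nat} {c : Char} {t : List Char}
    (hd : cs.drop j = c :: t) (hc : c ≠ '<') :
    matchAt cs oTag j = false ∧ matchAt cs cTag j = false := by
  constructor <;> simp [matchAt, hd, oTag, cTag, List.take_succ_cons, hc]

theorem between_open {cs : List Char} {i k : Nat} (h : matchAt cs oTag i = true)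
    (h1 : 1 ≤ k) (h7 : k ≤ 7) :
    matchAt cs oTag (i + k) = false ∧ matchAt cs cTag (i + k) = false := by
  have hd : cs.drop (i + k) = oTag.drop k ++ cs.drop (i + 8) := by
    rw [← List.drop_drop,
        show cs.drop i = oTag ++ cs.drop (i + 8) from by simpa [oTag] using drop_match h,
        List.drop_append_of_le_length (by simp [oTag]; omega)]
  interval_cases k <;>
    exact noMatch_head (by simpa [oTag] using hd) (by decide)

theorem between_close {cs : List Char} {i k : Nat} (h : matchAt cs cTag i = true)
    (h1 : 1 ≤ k) (h9 : k ≤ 9) :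
    matchAt cs oTag (i + k) = false ∧ matchAt cs cTag (i + k) = false := by
  have hd : cs.drop (i + k) = cTag.drop k ++ cs.drop (i + 10) := by
    rw [← List.drop_drop,
        show cs.drop i = cTag ++ cs.drop (i + 10) from by simpa [cTag] using drop_match h,
        List.drop_append_of_le_length (by simp [cTag]; omega)]
  interval_cases k <;>
    exact noMatch_head (by simpa [cTag] using hd) (by decide)

theorem open_close_disjoint {cs : List Char} {i : Nat} (h : matchAt cs cTag i = true) :
    matchAt cs oTag i = false := by
  by_contra hb
  have ho := drop_match (cs := cs) (pat := oTag) (i := i) (by simpa using hb)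
  have hcc := drop_match h
  rw [ho] at hcc
  simp [oTag, cTag] at hcc

-- unfolding lemmas for the fuelled loops (the fuel chosen by the wrappers always
-- aligns after a one-character step and dominates after a skip)

theorem pyFindF_ge {cs pat : List Char} {pos : Nat} (h : cs.length ≤ pos) :
    ∀ f, pyFindF cs pat f pos = none := by
  intro f
  cases f with
  | zero => rfl
  | succ f => rw [pyFindF, if_neg (by omega)]

theorem pyFind_ge {cs pat : List Char} {pos : Nat} (h : cs.length ≤ pos) :
    pyFind cs pat pos = none := pyFindF_ge h _

theorem pyFind_lt_pos {cs pat : List Char} {pos : Nat} (h : pos < cs.length)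
    (hm : matchAt cs pat pos = true) : pyFind cs pat pos = some pos := by
  unfold pyFind
  rw [show cs.length + 1 - pos = (cs.length - pos) + 1 by omega, pyFindF,
      if_pos h, if_pos hm]

theorem pyFind_lt_neg {cs pat : List Char} {pos : Nat} (h : pos < cs.length)
    (hm : matchAt cs pat pos = false) : pyFind cs pat pos = pyFind cs pat (pos + 1) := by
  unfold pyFind
  rw [show cs.length + 1 - pos = (cs.length - pos) + 1 by omega, pyFindF,
      if_pos h, if_neg (by simp [hm]),
      show cs.length - pos = cs.length + 1 - (pos + 1) by omega]

theorem pyFind_step {cs : List Char} {j : Nat} (ho : matchAt cs oTag j = false) :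
    pyFind cs oTag j = pyFind cs oTag (j + 1) := by
  by_cases h : j < cs.length
  · exact pyFind_lt_neg h ho
  · rw [pyFind_ge (by omega), pyFind_ge (by omega)]

theorem pyFind_chain {cs : List Char} : ∀ (n a b : Nat), b - a ≤ n → a ≤ b →
    (∀ j, a ≤ j → j < b → matchAt cs oTag j = false) →
    pyFind cs oTag a = pyFind cs oTag b := by
  intro n
  induction n with
  | zero =>
    intro a b hn hab _
    have hab2 : a = b := by omega
    rw [hab2]
  | succ n ih =>
    intro a b hn hab hno
    by_cases hlt : a < b
    · rw [pyFind_step (hno a (le_refl a) hlt)]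
      exact ih (a + 1) b (by omega) (by omega) (fun j hj1 hj2 => hno j (by omega) hj2)
    · have hab2 : a = b := by omega
      rw [hab2]

theorem pyFindF_some {cs pat : List Char} : ∀ (f pos s : Nat),
    pyFindF cs pat f pos = some s →
    pos ≤ s ∧ s < cs.length ∧ matchAt cs pat s = true := by
  intro f
  induction f with
  | zero => intro pos s h; cases h
  | succ f ih =>
    intro pos s h
    rw [pyFindF] at h
    split at h
    · split at h
      · injection h with hs
        subst hs
        exact ⟨le_refl _, by assumption, by assumption⟩
      · have := ih (pos + 1) s h
        exact ⟨by omega, this.2.1, this.2.2⟩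
    · cases h

theorem pyFind_some {cs pat : List Char} {pos s : Nat} (h : pyFind cs pat pos = some s) :
    pos ≤ s ∧ s < cs.length ∧ matchAt cs pat s = true := pyFindF_some _ _ _ h

theorem innerF_ge {cs : List Char} {i : Nat} {d : Int} (h : cs.length ≤ i) :
    ∀ f, innerF cs f i d = none := by
  intro f
  cases f with
  | zero => rfl
  | succ f => rw [innerF, if_neg (by omega)]

theorem innerA_ge {cs : List Char} {i : Nat} {d : Int} (h : cs.length ≤ i) :
    innerA cs i d = none := innerF_ge h _

theorem innerF_irrel {cs : List Char} : ∀ (f g i : Nat) (d : Int),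
    cs.length - i < f → cs.length - i < g → innerF cs f i d = innerF cs g i d := by
  intro f
  induction f with
  | zero => intro g i d hf hg; omega
  | succ f ih =>
    intro g i d hf hg
    by_cases hi : i < cs.length
    · cases g with
      | zero => omega
      | succ g =>
        rw [innerF, innerF]
        rw [if_pos hi, if_pos hi]
        split
        · exact ih g (i + 8) (d + 1) (by omega) (by omega)
        · split
          · split
            · rfl
            · exact ih g (i + 10) (d - 1) (by omega) (by omega)
          · exact ih g (i + 1) d (by omega) (by omega)
    · rw [innerF_ge (by omega), innerF_ge (by omega)]

theorem innerA_open {cs : List Char} {i : Nat} {d : Int} (h : i < cs.length)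
    (ho : matchAt cs oTag i = true) (h8 : i + 8 ≤ cs.length) :
    innerA cs i d = innerA cs (i + 8) (d + 1) := by
  unfold innerA
  rw [show cs.length + 1 - i = (cs.length - i) + 1 by omega, innerF, if_pos h, if_pos ho]
  exact innerF_irrel _ _ _ _ (by omega) (by omega)

theorem innerA_close_done {cs : List Char} {i : Nat} {d : Int} (h : i < cs.length)
    (ho : matchAt cs oTag i = false) (hc : matchAt cs cTag i = true) (h1 : d - 1 = 0) :
    innerA cs i d = some (i + 10) := by
  unfold innerA
  rw [show cs.length + 1 - i = (cs.length - i) + 1 by omega, innerF, if_pos h,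
      if_neg (by simp [ho]), if_pos hc, if_pos h1]

theorem innerA_close_go {cs : List Char} {i : Nat} {d : Int} (h : i < cs.length)
    (ho : matchAt cs oTag i = false) (hc : matchAt cs cTag i = true)
    (h1 : ¬(d - 1 = 0)) (h10 : i + 10 ≤ cs.length) :
    innerA cs i d = innerA cs (i + 10) (d - 1) := by
  unfold innerA
  rw [show cs.length + 1 - i = (cs.length - i) + 1 by omega, innerF, if_pos h,
      if_neg (by simp [ho]), if_pos hc, if_neg h1]
  exact innerF_irrel _ _ _ _ (by omega) (by omega)

theorem innerA_one {cs : List Char} {i : Nat} {d : Int} (h : i < cs.length)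
    (ho : matchAt cs oTag i = false) (hc : matchAt cs cTag i = false) :
    innerA cs i d = innerA cs (i + 1) d := by
  unfold innerA
  rw [show cs.length + 1 - i = (cs.length - i) + 1 by omega, innerF, if_pos h,
      if_neg (by simp [ho]), if_neg (by simp [hc]),
      show cs.length - i = cs.length + 1 - (i + 1) by omega]

theorem innerF_gt {cs : List Char} : ∀ (f i : Nat) (d : Int) (e : Nat),
    innerF cs f i d = some e → i + 10 ≤ e := by
  intro f
  induction f with
  | zero => intro i d e h; cases h
  | succ f ih =>
    intro i d e h
    rw [innerF] at h
    split at h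
    · split at h
      · have := ih (i + 8) (d + 1) e h; omega
      · split at h
        · split at h
          · injection h with he; omega
          · have := ih (i + 10) (d - 1) e h; omega
        · have := ih (i + 1) d e h; omega
    · cases h

theorem innerA_gt {cs : List Char} {i : Nat} {d : Int} {e : Nat}
    (h : innerA cs i d = some e) : i + 10 ≤ e := innerF_gt _ _ _ _ h

theorem evtsF_ge {cs : List Char} {i : Nat} (h : cs.length ≤ i) :
    ∀ f, evtsF cs f i = [] := by
  intro f
  cases f with
  | zero => rfl
  | succ f => rw [evtsF, if_neg (by omega)]

theorem evtsB_ge {cs : List Char} {i : Nat} (h : cs.length ≤ i) : evtsB cs i = [] :=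
  evtsF_ge h _

theorem evtsB_open1 {cs : List Char} {i : Nat} (h : i < cs.length)
    (ho : matchAt cs oTag i = true) : evtsB cs i = (i, 1) :: evtsB cs (i + 1) := by
  unfold evtsB
  rw [show cs.length + 1 - i = (cs.length - i) + 1 by omega, evtsF, if_pos h, if_pos ho,
      show cs.length - i = cs.length + 1 - (i + 1) by omega]

theorem evtsB_close1 {cs : List Char} {i : Nat} (h : i < cs.length)
    (ho : matchAt cs oTag i = false) (hc : matchAt cs cTag i = true) :
    evtsB cs i = (i, -1) :: evtsB cs (i + 1) := by
  unfold evtsB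
  rw [show cs.length + 1 - i = (cs.length - i) + 1 by omega, evtsF, if_pos h,
      if_neg (by simp [ho]), if_pos hc,
      show cs.length - i = cs.length + 1 - (i + 1) by omega]

theorem evtsB_step {cs : List Char} {j : Nat} (ho : matchAt cs oTag j = false)
    (hc : matchAt cs cTag j = false) : evtsB cs j = evtsB cs (j + 1) := by
  by_cases h : j < cs.length
  · unfold evtsB
    rw [show cs.length + 1 - j = (cs.length - j) + 1 by omega, evtsF, if_pos h,
        if_neg (by simp [ho]), if_neg (by simp [hc]),
        show cs.length - j = cs.length + 1 - (j + 1) by omega]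
  · rw [evtsB_ge (by omega), evtsB_ge (by omega)]

theorem evtsB_chain {cs : List Char} : ∀ (n a b : Nat), b - a ≤ n → a ≤ b →
    (∀ j, a ≤ j → j < b → matchAt cs oTag j = false ∧ matchAt cs cTag j = false) →
    evtsB cs a = evtsB cs b := by
  intro n
  induction n with
  | zero =>
    intro a b hn hab _
    have hab2 : a = b := by omega
    rw [hab2]
  | succ n ih =>
    intro a b hn hab hno
    by_cases hlt : a < b
    · have h := hno a (le_refl a) hlt
      rw [evtsB_step h.1 h.2]
      exact ih (a + 1) b (by omega) (by omega) (fun j hj1 hj2 => hno j (by omega) hj2)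
    · have hab2 : a = b := by omega
      rw [hab2]

theorem evtsB_open {cs : List Char} {i : Nat} (h : matchAt cs oTag i = true) :
    evtsB cs i = (i, 1) :: evtsB cs (i + 8) := by
  have hl : i + 8 ≤ cs.length := by simpa [oTag] using match_len h (by decide)
  rw [evtsB_open1 (by omega) h]
  congr 1
  exact evtsB_chain 7 (i + 1) (i + 8) (by omega) (by omega)
    (fun j hj1 hj2 => by
      have := between_open h (k := j - i) (by omega) (by omega)
      rwa [show i + (j - i) = j by omega] at this)

theorem evtsB_close {cs : List Char} {i : Nat} (h : matchAt cs cTag i = true) :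
    evtsB cs i = (i, -1) :: evtsB cs (i + 10) := by
  have hl : i + 10 ≤ cs.length := by simpa [cTag] using match_len h (by decide)
  rw [evtsB_close1 (by omega) (open_close_disjoint h) h]
  congr 1
  exact evtsB_chain 9 (i + 1) (i + 10) (by omega) (by omega)
    (fun j hj1 hj2 => by
      have := between_close h (k := j - i) (by omega) (by omega)
      rwa [show i + (j - i) = j by omega] at this)

-- phase 1 of B ↔ A's outer find: skipping non-open events lands on the buffer's
-- next '<section' occurrence
theorem phase1 (cs : List Char) : ∀ (n pos : Nat), cs.length - pos ≤ n →
    skipToOpen (evtsB cs pos) =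
      (pyFind cs oTag pos).elim ([] : List (Nat × Int)) (fun s => evtsB cs s) := by
  intro n
  induction n with
  | zero =>
    intro pos hn
    rw [evtsB_ge (by omega), pyFind_ge (by omega)]
    simp [skipToOpen]
  | succ n ih =>
    intro pos hn
    by_cases hlen : pos < cs.length
    · by_cases ho : matchAt cs oTag pos = true
      · rw [evtsB_open ho, pyFind_lt_pos hlen ho]
        simp only [skipToOpen, Option.elim]
        rw [if_neg (by simp)]
        exact (evtsB_open ho).symm
      · by_cases hc : matchAt cs cTag pos = true
        · have hl : pos + 10 ≤ cs.length := by simpa [cTag] using match_len hc (by decide)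
          have hfind : pyFind cs oTag pos = pyFind cs oTag (pos + 10) := by
            rw [pyFind_step (by simpa using ho)]
            exact pyFind_chain 9 (pos + 1) (pos + 10) (by omega) (by omega)
              (fun j hj1 hj2 => by
                have := (between_close hc (k := j - pos) (by omega) (by omega)).1
                rwa [show pos + (j - pos) = j by omega] at this)
          rw [evtsB_close hc]
          simp only [skipToOpen]
          rw [if_pos (by simp), hfind]
          exact ih (pos + 10) (by omega)
        · rw [evtsB_step (by simpa using ho) (by simpa using hc),
              pyFind_step (by simpa using ho)]
          exact ih (pos + 1) (by omega)
    · rw [evtsB_ge (by omega), pyFind_ge (by omega)]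
      simp [skipToOpen]

-- phase 2 of B ↔ A's inner scan (depth ≥ 1, i.e. after the opening tag was consumed)
theorem phase2 (cs : List Char) : ∀ (n i : Nat) (d : Int), 1 ≤ d → cs.length - i ≤ n →
    consumeB (evtsB cs i) d = (innerA cs i d).map (fun e => (e, evtsB cs e)) := by
  intro n
  induction n with
  | zero =>
    intro i d hd hn
    rw [evtsB_ge (by omega), innerA_ge (by omega)]
    simp [consumeB]
  | succ n ih =>
    intro i d hd hn
    by_cases hlen : i < cs.length
    · by_cases ho : matchAt cs oTag i = true
      · have h8 : i + 8 ≤ cs.length := by simpa [oTag] using match_len ho (by decide)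
        rw [evtsB_open ho, consumeB]
        have hp2 : ((i, (1 : Int)).2) = 1 := rfl
        rw [hp2, if_neg (by omega), innerA_open hlen ho h8]
        exact ih (i + 8) (d + 1) (by omega) (by omega)
      · by_cases hc : matchAt cs cTag i = true
        · have h10 : i + 10 ≤ cs.length := by simpa [cTag] using match_len hc (by decide)
          rw [evtsB_close hc, consumeB]
          have hp1 : ((i, (-1 : Int)).1) = i := rfl
          have hp2 : ((i, (-1 : Int)).2) = -1 := rfl
          rw [hp1, hp2]
          by_cases h1 : d = 1
          · rw [if_pos (show d + -1 = 0 by omega),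
                innerA_close_done hlen (by simpa using ho) hc (by omega)]
            simp
          · rw [if_neg (show ¬(d + -1 = 0) by omega),
                innerA_close_go hlen (by simpa using ho) hc (by omega) h10,
                show d + (-1) = d - 1 by ring]
            exact ih (i + 10) (d - 1) (by omega) (by omega)
        · rw [evtsB_step (by simpa using ho) (by simpa using hc),
              innerA_one hlen (by simpa using ho) (by simpa using hc)]
          exact ih (i + 1) d hd (by omega)
    · rw [evtsB_ge (by omega), innerA_ge (by omega)]
      simp [consumeB]

theorem phase2_entry {cs : List Char} {s : Nat} (h : matchAt cs oTag s = true) :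
    consumeB (evtsB cs s) 0 = (innerA cs s 0).map (fun e => (e, evtsB cs e)) := by
  have hl : s + 8 ≤ cs.length := by simpa [oTag] using match_len h (by decide)
  rw [evtsB_open h, consumeB]
  have h0 : (0 : Int) + ((s, (1 : Int)).2) = 1 := by norm_num
  rw [h0, if_neg (by norm_num), innerA_open (by omega) h hl,
      show (0 : Int) + 1 = 1 by norm_num]
  exact phase2 cs (cs.length - (s + 8)) (s + 8) 1 (by omega) (le_refl _)

theorem skipToOpen_length (evs : List (Nat × Int)) : (skipToOpen evs).length ≤ evs.length := by
  induction evs with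
  | nil => simp [skipToOpen]
  | cons e t ih =>
    rw [skipToOpen]
    split
    · simp; omega
    · simp

theorem consumeB_length : ∀ (evs : List (Nat × Int)) (d : Int) (e : Nat) (rest : List (Nat × Int)),
    consumeB evs d = some (e, rest) → rest.length < evs.length := by
  intro evs
  induction evs with
  | nil => intro d e rest h; cases h
  | cons x t ih =>
    intro d e rest h
    rw [consumeB] at h
    split at h
    · simp only [Option.some.injEq, Prod.mk.injEq] at h
      obtain ⟨-, ht⟩ := h
      simp [← ht]
    · have := ih _ _ _ h
      simp
      omega

-- unfolding lemmas for the two fuelled outer loops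
theorem outerF_none {cs : List Char} {f pos : Nat} {acc : List String}
    (hf : pyFind cs oTag pos = none) : outerF cs (f + 1) pos acc = acc := by
  simp [outerF, hf]

theorem outerF_stop {cs : List Char} {f pos s : Nat} {acc : List String}
    (hf : pyFind cs oTag pos = some s) (hi : innerA cs s 0 = none) :
    outerF cs (f + 1) pos acc = acc := by
  simp [outerF, hf, hi]

theorem outerF_step {cs : List Char} {f pos s e : Nat} {acc : List String}
    (hf : pyFind cs oTag pos = some s) (hi : innerA cs s 0 = some e) :
    outerF cs (f + 1) pos acc =
      outerF cs f e (acc ++ [String.ofList ((cs.drop s).take (e - s))]) := by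
  simp [outerF, hf, hi]

theorem scanF_nil {cs : List Char} {evs : List (Nat × Int)} {acc : List String}
    (h : skipToOpen evs = []) : ∀ f, scanF cs f evs acc = acc := by
  intro f
  cases f with
  | zero => rfl
  | succ f => simp [scanF, h]

theorem scanF_stop {cs : List Char} {evs : List (Nat × Int)} {acc : List String}
    {e : Nat × Int} {t : List (Nat × Int)}
    (hs : skipToOpen evs = e :: t) (hc : consumeB (e :: t) 0 = none) :
    ∀ f, scanF cs (f + 1) evs acc = acc := by
  intro f
  simp [scanF, hs, hc]

theorem scanF_step {cs : List Char} {evs : List (Nat × Int)} {acc : List String}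
    {e : Nat × Int} {t : List (Nat × Int)} {endp : Nat} {rest : List (Nat × Int)}
    (hs : skipToOpen evs = e :: t) (hc : consumeB (e :: t) 0 = some (endp, rest)) :
    ∀ f, scanF cs (f + 1) evs acc =
      scanF cs f rest (acc ++ [String.ofList ((cs.drop e.1).take (endp - e.1))]) := by
  intro f
  simp [scanF, hs, hc]

theorem scanF_irrel {cs : List Char} : ∀ (f g : Nat) (evs : List (Nat × Int)) (acc : List String),
    evs.length < f → evs.length < g → scanF cs f evs acc = scanF cs g evs acc := by
  intro f
  induction f with
  | zero => intro g evs acc hf hg; omega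
  | succ f ih =>
    intro g evs acc hf hg
    cases g with
    | zero => omega
    | succ g =>
      cases hs : skipToOpen evs with
      | nil => rw [scanF_nil hs, scanF_nil hs]
      | cons e t =>
        cases hc : consumeB (e :: t) 0 with
        | none => rw [scanF_stop hs hc, scanF_stop hs hc]
        | some p =>
          obtain ⟨endp, rest⟩ := p
          have hle : (e :: t).length ≤ evs.length := by
            rw [← hs]; exact skipToOpen_length evs
          have hlt := consumeB_length _ _ _ _ hc
          rw [scanF_step hs hc, scanF_step hs hc]
          exact ih g rest _ (by omega) (by omega)

theorem main_outer (cs : List Char) : ∀ (n pos : Nat) (acc : List String),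
    cs.length + 10 - pos ≤ 10 * n →
    outerF cs n pos acc = scanF cs ((evtsB cs pos).length + 1) (evtsB cs pos) acc := by
  intro n
  induction n with
  | zero =>
    intro pos acc hn
    rw [evtsB_ge (by omega), scanF_nil rfl]
    rfl
  | succ n ih =>
    intro pos acc hn
    cases hf : pyFind cs oTag pos with
    | none =>
      have hskip : skipToOpen (evtsB cs pos) = [] := by
        rw [phase1 cs cs.length pos (by omega), hf]
        rfl
      rw [outerF_none hf, scanF_nil hskip]
    | some s =>
      have hsome := pyFind_some hf
      have hskip : skipToOpen (evtsB cs pos) = (s, 1) :: evtsB cs (s + 8) := by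
        rw [phase1 cs cs.length pos (by omega), hf]
        exact evtsB_open hsome.2.2
      have hcons : consumeB (((s, 1) : Nat × Int) :: evtsB cs (s + 8)) 0 =
          (innerA cs s 0).map (fun e => (e, evtsB cs e)) := by
        rw [← evtsB_open hsome.2.2]
        exact phase2_entry hsome.2.2
      cases hi : innerA cs s 0 with
      | none =>
        rw [hi] at hcons
        rw [outerF_stop hf hi, scanF_stop hskip hcons]
      | some e =>
        rw [hi] at hcons
        have he := innerA_gt hi
        have hlen1 : ((s, 1) :: evtsB cs (s + 8)).length ≤ (evtsB cs pos).length := by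
          rw [← hskip]; exact skipToOpen_length _
        have hlen2 := consumeB_length _ _ _ _ hcons
        have hl3 : (evtsB cs e).length < (evtsB cs pos).length := by
          simp only [List.length_cons] at hlen1 hlen2
          omega
        rw [outerF_step hf hi, scanF_step hskip hcons ((evtsB cs pos).length)]
        exact (ih e (acc ++ [String.ofList ((cs.drop s).take (e - s))]) (by omega)).trans
          (scanF_irrel ((evtsB cs e).length + 1) ((evtsB cs pos).length) (evtsB cs e) _
            (by omega) (by omega))

-- ===== VERDICT (by name: the statement is the Claim_ definition above) =====
theorem extract_sections_from_buffer_spec : Claim_equal_extract_sections_from_buffer := by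
  intro buffer _
  unfold Spec_extract_sections_from_buffer extract_sections_from_buffer extract_sections_from_buffer_alt
  have h := main_outer buffer.toList (buffer.toList.length + 1) 0 [] (by omega)
  simpa using h
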